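-- pv_equiv track=rewrite | github.com/thelawclaw11/python_algo | algorithmDesignManuel/seven/check_if_graph_contains_cycle_with_e.py | check
-- ===== SOURCE A (Python) =====
-- def check(graph, e):
--     start, end = e
--     graph[start].remove(end)
--     graph[end].remove(start)
--
--     visited = set()
--
--     def f(node):
--         if node in visited:
--             return
--
--         visited.add(node)
--
--         for friend in graph[node]:
--             f(friend)
--
--     f(end)
--
--     return start in visited
-- ===== SOURCE B (Python) =====
-- def check(graph, e):
--     # Round-based fixpoint saturation instead of A's recursive DFS:
--     # len(graph) rounds of "visited |= neighbours(visited)" saturate the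
--     # reachable set, because the set of visited *keys* can grow at most
--     # len(graph) times and the neighbour pool depends only on visited keys.
--     # Mutates graph exactly like A (the two .remove calls).
--     start, end = e
--     graph[start].remove(end)
--     graph[end].remove(start)
--
--     visited = {end}
--     for _ in range(len(graph)):
--         visited = visited | {w for v in visited for w in graph[v]}
--
--     return start in visited
-- ===== Notes on version B (the rewrite author's own statement) =====
-- stated objective: alternative
-- what changed: A's recursive DFS helper is replaced by a round-based fixpoint saturation: len(graph) rounds of set algebra (visited |= neighbours(visited)) compute the same reachable set with no recursion and no stack; the two edge-removal mutations are kept identical.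
import Mathlib
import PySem

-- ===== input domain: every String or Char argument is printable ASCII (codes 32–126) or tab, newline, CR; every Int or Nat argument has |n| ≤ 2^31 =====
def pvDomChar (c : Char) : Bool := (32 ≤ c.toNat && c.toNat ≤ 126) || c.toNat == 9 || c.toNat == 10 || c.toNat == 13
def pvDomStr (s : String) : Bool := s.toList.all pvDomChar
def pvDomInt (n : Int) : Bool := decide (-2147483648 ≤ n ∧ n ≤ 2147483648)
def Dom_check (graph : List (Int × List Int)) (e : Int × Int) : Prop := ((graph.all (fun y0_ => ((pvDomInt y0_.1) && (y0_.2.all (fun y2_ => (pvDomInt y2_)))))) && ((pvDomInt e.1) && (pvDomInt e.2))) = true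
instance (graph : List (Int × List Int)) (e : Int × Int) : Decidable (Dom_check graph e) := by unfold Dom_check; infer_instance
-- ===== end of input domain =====

-- B replaces A's recursive DFS helper with a round-based fixpoint saturation (len(graph) rounds of
-- 'visited |= neighbours(visited)') — a different algorithm of the same result, not faster.
-- Both Pythons mutate `graph` in place identically (the two .remove calls); the equivalence proved is about the return value.

-- ===== PORT A =====
-- shared removal step of both Pythons: graph[a].remove(b).
-- (Python raises KeyError when a is no key and ValueError when b ∉ graph[a]; Pre_check excludes those inputs,
-- so the getD-totalisations below are never taken on admitted inputs.)
def pvRemoveAdj (g : PySem.Dict Int (List Int)) (a b : Int) : PySem.Dict Int (List Int) :=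
  g.modify a [] (fun l => (PySem.List.remove? l b).getD l)

-- A's recursive helper `f`, with a fuel argument for totality: each recursive call strictly enlarges `visited`
-- by a node drawn from {start node} ∪ neighbour lists, so the fuel passed by `check` below is never exhausted.
def checkDfs (g : PySem.Dict Int (List Int)) : Nat → PySem.Set Int → Int → PySem.Set Int
  | 0, visited, _ => visited
  | n+1, visited, node =>
    if node ∈ visited then visited
    else (g.getD node []).foldl (fun v friend => checkDfs g n v friend) (PySem.Set.add visited node)

def check (graph : List (Int × List Int)) (e : Int × Int) : Bool :=
  let g := pvRemoveAdj (pvRemoveAdj (PySem.Dict.mk graph) e.1 e.2) e.2 e.1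
  decide (e.1 ∈ checkDfs g (2 + (g.values.map List.length).sum) PySem.Set.empty e.2)

-- ===== PORT B =====
-- one Python round: visited | {w for v in visited for w in graph[v]}
def checkNbrs (g : PySem.Dict Int (List Int)) (visited : PySem.Set Int) : PySem.Set Int :=
  visited.foldl (fun s v => PySem.Set.update s (g.getD v [])) PySem.Set.empty

def checkRound (g : PySem.Dict Int (List Int)) (visited : PySem.Set Int) : PySem.Set Int :=
  PySem.Set.union visited (checkNbrs g visited)

def check_alt (graph : List (Int × List Int)) (e : Int × Int) : Bool :=
  let g := pvRemoveAdj (pvRemoveAdj (PySem.Dict.mk graph) e.1 e.2) e.2 e.1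
  decide (e.1 ∈ (List.range graph.length).foldl (fun v _ => checkRound g v) (PySem.Set.ofList [e.2]))

-- ===== PRECONDITION & SPEC =====
-- nodes reachable from src in at most n one-step expansions (n = graph.length + 3 saturates: on a shortest
-- path every node before the last has an outgoing edge, hence is a key, and keys are not repeated)
def pvReachSet (g : PySem.Dict Int (List Int)) (src : Int) (n : Nat) : Finset Int :=
  (fun S => S ∪ S.biUnion (fun x => (g.getD x []).toFinset))^[n] {src}

-- Pre_check holds exactly when the Python A returns normally: e.1 and e.2 are keys and the edge is present in
-- both adjacency lists (twice in one for a self-loop) — else .remove raises KeyError/ValueError — and every node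
-- reachable from e.2 after the two removals is a key — else the DFS raises KeyError when it reaches it.
def Pre_check (graph : List (Int × List Int)) (e : Int × Int) : Prop :=
  e.1 ∈ graph.map Prod.fst ∧ e.2 ∈ graph.map Prod.fst ∧
  (if e.1 = e.2 then 2 ≤ ((PySem.Dict.mk graph).getD e.1 []).count e.1
   else e.2 ∈ (PySem.Dict.mk graph).getD e.1 [] ∧ e.1 ∈ (PySem.Dict.mk graph).getD e.2 []) ∧
  ∀ x ∈ pvReachSet (pvRemoveAdj (pvRemoveAdj (PySem.Dict.mk graph) e.1 e.2) e.2 e.1) e.2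
      (graph.length + 3), x ∈ graph.map Prod.fst

instance (graph : List (Int × List Int)) (e : Int × Int) : Decidable (Pre_check graph e) := by
  unfold Pre_check; infer_instance

def pvWitness_check : (List (Int × List Int)) × (Int × Int) := ([(0, [1]), (1, [0])], (0, 1))

def Spec_check (graph : List (Int × List Int)) (e : Int × Int) (out : Bool) : Prop := out = check_alt graph e
instance (graph : List (Int × List Int)) (e : Int × Int) (out : Bool) : Decidable (Spec_check graph e out) := by
  unfold Spec_check; infer_instance

-- ===== CLAIM (what is proved, stated in full; the proofs are below) =====
def Claim_equal_check : Prop := ∀ (graph : List (Int × List Int)) (e : Int × Int), Dom_check graph e → Pre_check graph e → Spec_check graph e (check graph e)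

-- ===== LEMMAS AND PROOFS =====

-- reachability in the graph after the removals: the common characterisation of both traversals
def pvStep (g : PySem.Dict Int (List Int)) (x y : Int) : Prop := y ∈ g.getD x []
def pvReach (g : PySem.Dict Int (List Int)) : Int → Int → Prop := Relation.ReflTransGen (pvStep g)

-- the finite universe of nodes a traversal can ever add (beyond its start node)
def pvU (g : PySem.Dict Int (List Int)) : Finset Int := g.values.flatten.toFinset

lemma pvNbrs_subset_U (g : PySem.Dict Int (List Int)) (x z : Int) (hz : z ∈ g.getD x []) :
    z ∈ pvU g := by
  rw [PySem.Dict.getD_eq_get?_getD] at hz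
  cases hg : g.get? x with
  | none => rw [hg] at hz; simp at hz
  | some l =>
    rw [hg] at hz
    have hmem := PySem.Dict.mem_items_of_get?_eq_some g hg
    have hl : l ∈ g.values := by
      simp only [PySem.Dict.values]
      exact List.mem_map.mpr ⟨(x, l), hmem, rfl⟩
    simp only [pvU, List.mem_toFinset, List.mem_flatten]
    exact ⟨l, hl, hz⟩

lemma foldl_mem_mono (f : PySem.Set Int → Int → PySem.Set Int)
    (hf : ∀ s a x, x ∈ s → x ∈ f s a) :
    ∀ (L : List Int) (s : PySem.Set Int) (x : Int), x ∈ s → x ∈ L.foldl f s := by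
  intro L
  induction L with
  | nil => intro s x hx; simpa using hx
  | cons a L ih => intro s x hx; exact ih (f s a) x (hf s a x hx)

lemma foldl_mem_sound (f : PySem.Set Int → Int → PySem.Set Int) (P : Int → Int → Prop)
    (hf : ∀ s a x, x ∈ f s a → x ∈ s ∨ P a x) :
    ∀ (L : List Int) (s : PySem.Set Int) (x : Int), x ∈ L.foldl f s → x ∈ s ∨ ∃ a ∈ L, P a x := by
  intro L
  induction L with
  | nil => intro s x hx; simp at hx; exact Or.inl hx
  | cons a L ih =>
    intro s x hx
    rcases ih (f s a) x hx with h | ⟨b, hb, hPb⟩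
    · rcases hf s a x h with h' | h'
      · exact Or.inl h'
      · exact Or.inr ⟨a, List.mem_cons_self, h'⟩
    · exact Or.inr ⟨b, List.mem_cons_of_mem a hb, hPb⟩

-- ---- port A: monotonicity, soundness, self-membership, closedness ----

lemma checkDfs_mono (g : PySem.Dict Int (List Int)) :
    ∀ (n : Nat) (v : PySem.Set Int) (node x : Int), x ∈ v → x ∈ checkDfs g n v node := by
  intro n
  induction n with
  | zero => intro v node x hx; simpa [checkDfs] using hx
  | succ n ih =>
    intro v node x hx
    simp only [checkDfs]
    split
    · exact hx
    · exact foldl_mem_mono _ (fun s a y hy => ih s a y hy) _ _ x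
        ((PySem.Set.mem_add v node x).mpr (Or.inl hx))

lemma checkDfs_sound (g : PySem.Dict Int (List Int)) :
    ∀ (n : Nat) (v : PySem.Set Int) (node x : Int),
      x ∈ checkDfs g n v node → x ∈ v ∨ pvReach g node x := by
  intro n
  induction n with
  | zero => intro v node x hx; exact Or.inl (by simpa [checkDfs] using hx)
  | succ n ih =>
    intro v node x hx
    simp only [checkDfs] at hx
    split at hx
    · exact Or.inl hx
    · rcases foldl_mem_sound _ (pvReach g) (fun s a y hy => ih s a y hy) _ _ x hx with h | ⟨a, ha, hr⟩
      · rcases (PySem.Set.mem_add v node x).mp h with h' | h'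
        · exact Or.inl h'
        · exact Or.inr (h' ▸ Relation.ReflTransGen.refl)
      · exact Or.inr (Relation.ReflTransGen.head ha hr)

lemma checkDfs_self (g : PySem.Dict Int (List Int)) (n : Nat) (v : PySem.Set Int) (node : Int)
    (hn : 1 ≤ n) : node ∈ checkDfs g n v node := by
  cases n with
  | zero => omega
  | succ n =>
    simp only [checkDfs]
    split
    · assumption
    · exact foldl_mem_mono _ (fun s a y hy => checkDfs_mono g n s a y hy) _ _ node
        ((PySem.Set.mem_add v node node).mpr (Or.inr rfl))

lemma foldDfs_self (g : PySem.Dict Int (List Int)) (n : Nat) (hn : 1 ≤ n) :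
    ∀ (L : List Int) (V : PySem.Set Int) (a : Int), a ∈ L →
      a ∈ L.foldl (fun v friend => checkDfs g n v friend) V := by
  intro L
  induction L with
  | nil => intro V a ha; simp at ha
  | cons b L ih =>
    intro V a ha
    simp only [List.foldl_cons]
    rcases List.mem_cons.mp ha with rfl | ha'
    · exact foldl_mem_mono _ (fun s c y hy => checkDfs_mono g n s c y hy) L _ a
        (checkDfs_self g n V a hn)
    · exact ih _ a ha'

lemma checkDfs_closed (g : PySem.Dict Int (List Int)) :
    ∀ (n : Nat) (v : PySem.Set Int) (node : Int),
      (insert node (pvU g) \ v.toFinset).card < n →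
      ∀ y, y ∈ checkDfs g n v node → y ∉ v →
        ∀ z ∈ g.getD y [], z ∈ checkDfs g n v node := by
  intro n
  induction n with
  | zero => intro v node h; omega
  | succ n ih =>
    intro v node hcard y hy hyv z hz
    by_cases hnv : node ∈ v
    · simp only [checkDfs, if_pos hnv] at hy ⊢
      exact absurd hy hyv
    · have hnode_in : node ∈ insert node (pvU g) \ v.toFinset := by
        simp [Finset.mem_sdiff, List.mem_toFinset, hnv]
      have hpos : 1 ≤ (insert node (pvU g) \ v.toFinset).card := Finset.card_pos.mpr ⟨node, hnode_in⟩
      have hV0card : (pvU g \ (PySem.Set.add v node).toFinset).card < n := by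
        have hsub : pvU g \ (PySem.Set.add v node).toFinset ⊆
            (insert node (pvU g) \ v.toFinset).erase node := by
          intro x hx
          rcases Finset.mem_sdiff.mp hx with ⟨hxU, hxV⟩
          rw [List.mem_toFinset] at hxV
          have hxv : x ∉ v := fun h => hxV ((PySem.Set.mem_add v node x).mpr (Or.inl h))
          have hxn : x ≠ node := fun h => hxV ((PySem.Set.mem_add v node x).mpr (Or.inr h))
          exact Finset.mem_erase.mpr ⟨hxn, Finset.mem_sdiff.mpr ⟨Finset.mem_insert_of_mem hxU, by
            rw [List.mem_toFinset]; exact hxv⟩⟩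
        calc (pvU g \ (PySem.Set.add v node).toFinset).card
            ≤ ((insert node (pvU g) \ v.toFinset).erase node).card := Finset.card_le_card hsub
          _ = (insert node (pvU g) \ v.toFinset).card - 1 := Finset.card_erase_of_mem hnode_in
          _ < n := by omega
      have hn1 : 1 ≤ n := by omega
      -- the generalized closedness of the neighbour fold
      have foldClosed : ∀ (L : List Int), (∀ a ∈ L, a ∈ pvU g) → ∀ (V : PySem.Set Int),
          (pvU g \ V.toFinset).card < n →
          ∀ y, y ∈ L.foldl (fun v friend => checkDfs g n v friend) V → y ∉ V →
            ∀ z ∈ g.getD y [], z ∈ L.foldl (fun v friend => checkDfs g n v friend) V := by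
        intro L
        induction L with
        | nil => intro _ V _ y hy hyV; exact absurd (by simpa using hy) hyV
        | cons a L ihL =>
          intro hLU V hVcard y hy hyV z hz
          simp only [List.foldl_cons] at hy ⊢
          have haU : a ∈ pvU g := hLU a List.mem_cons_self
          have hV1mono : ∀ x ∈ V, x ∈ checkDfs g n V a := fun x hx => checkDfs_mono g n V a x hx
          have hacard : (insert a (pvU g) \ V.toFinset).card < n := by
            rw [Finset.insert_eq_self.mpr haU]; exact hVcard
          by_cases hyV1 : y ∈ checkDfs g n V a
          · have hcl := ih V a hacard y hyV1 hyV z hz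
            exact foldl_mem_mono _ (fun s c w hw => checkDfs_mono g n s c w hw) _ _ z hcl
          · have hV1card : (pvU g \ (checkDfs g n V a).toFinset).card < n := by
              have hsub : pvU g \ (checkDfs g n V a).toFinset ⊆ pvU g \ V.toFinset := by
                intro x hx
                rcases Finset.mem_sdiff.mp hx with ⟨hxU, hxV1⟩
                rw [List.mem_toFinset] at hxV1
                exact Finset.mem_sdiff.mpr ⟨hxU, by
                  rw [List.mem_toFinset]; exact fun h => hxV1 (hV1mono x h)⟩
              exact lt_of_le_of_lt (Finset.card_le_card hsub) hVcard
            exact ihL (fun b hb => hLU b (List.mem_cons_of_mem a hb)) _ hV1card y hy hyV1 z hz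
      simp only [checkDfs, if_neg hnv] at hy ⊢
      by_cases hyn : y = node
      · subst hyn
        exact foldDfs_self g n hn1 _ _ z (hz)
      · have hyV0 : y ∉ PySem.Set.add v node := fun h => by
          rcases (PySem.Set.mem_add v node y).mp h with h' | h'
          · exact hyv h'
          · exact hyn h'
        exact foldClosed _ (fun a ha => pvNbrs_subset_U g node a ha) _ hV0card y hy hyV0 z hz

lemma checkDfs_correct (g : PySem.Dict Int (List Int)) (n : Nat) (e0 x : Int)
    (hn : (insert e0 (pvU g)).card < n) :
    x ∈ checkDfs g n PySem.Set.empty e0 ↔ pvReach g e0 x := by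
  have hcard : (insert e0 (pvU g) \ (PySem.Set.empty : PySem.Set Int).toFinset).card < n := by
    simpa [PySem.Set.empty] using hn
  constructor
  · intro h
    rcases checkDfs_sound g n _ e0 x h with h' | h'
    · simp [PySem.Set.empty] at h'
    · exact h'
  · intro h
    induction h with
    | refl => exact checkDfs_self g n _ e0 (by omega)
    | tail _ hbc ihb =>
      exact checkDfs_closed g n PySem.Set.empty e0 hcard _ ihb (by simp [PySem.Set.empty]) _ hbc

lemma pv_fuelA_ok (g : PySem.Dict Int (List Int)) (e0 : Int) :
    (insert e0 (pvU g)).card < 2 + (g.values.map List.length).sum := by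
  have h1 : (insert e0 (pvU g)).card ≤ (pvU g).card + 1 := Finset.card_insert_le e0 (pvU g)
  have h2 : (pvU g).card ≤ g.values.flatten.length := List.toFinset_card_le _
  have h3 : g.values.flatten.length = (g.values.map List.length).sum := List.length_flatten
  omega

-- ---- port B: the saturation argument ----

-- membership in one round
lemma mem_foldl_update (g : PySem.Dict Int (List Int)) :
    ∀ (L : List Int) (s : PySem.Set Int) (y : Int),
      y ∈ L.foldl (fun s v => PySem.Set.update s (g.getD v [])) s ↔
        y ∈ s ∨ ∃ v ∈ L, y ∈ g.getD v [] := by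
  intro L
  induction L with
  | nil => intro s y; simp
  | cons a L ih =>
    intro s y
    simp only [List.foldl_cons, ih, PySem.Set.mem_update, List.mem_cons]
    constructor
    · rintro ((h | h) | ⟨v, hv, hy⟩)
      · exact Or.inl h
      · exact Or.inr ⟨a, Or.inl rfl, h⟩
      · exact Or.inr ⟨v, Or.inr hv, hy⟩
    · rintro (h | ⟨v, rfl | hv, hy⟩)
      · exact Or.inl (Or.inl h)
      · exact Or.inl (Or.inr hy)
      · exact Or.inr ⟨v, hv, hy⟩

lemma mem_checkRound (g : PySem.Dict Int (List Int)) (v : PySem.Set Int) (y : Int) :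
    y ∈ checkRound g v ↔ y ∈ v ∨ ∃ x ∈ v, y ∈ g.getD x [] := by
  simp only [checkRound, checkNbrs, PySem.Set.mem_union, mem_foldl_update]
  simp [PySem.Set.empty]

-- the sequence of rounds
def pvIter (g : PySem.Dict Int (List Int)) (v0 : PySem.Set Int) (n : Nat) : PySem.Set Int :=
  (List.range n).foldl (fun v _ => checkRound g v) v0

lemma pvIter_succ (g : PySem.Dict Int (List Int)) (v0 : PySem.Set Int) (n : Nat) :
    pvIter g v0 (n+1) = checkRound g (pvIter g v0 n) := by
  simp [pvIter, List.range_succ]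

lemma pvIter_mono (g : PySem.Dict Int (List Int)) (v0 : PySem.Set Int) {n k : Nat} (h : n ≤ k)
    {y : Int} (hy : y ∈ pvIter g v0 n) : y ∈ pvIter g v0 k := by
  obtain ⟨d, rfl⟩ := Nat.exists_eq_add_of_le h
  clear h
  induction d with
  | zero => simpa using hy
  | succ d ih =>
    have hidx : n + (d + 1) = (n + d) + 1 := by omega
    rw [hidx, pvIter_succ]
    exact (mem_checkRound g _ y).mpr (Or.inl ih)

lemma pvIter_sound (g : PySem.Dict Int (List Int)) (e0 : Int) :
    ∀ (n : Nat) (x : Int), x ∈ pvIter g (PySem.Set.ofList [e0]) n → pvReach g e0 x := by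
  intro n
  induction n with
  | zero =>
    intro x hx
    simp only [pvIter, List.range_zero, List.foldl_nil] at hx
    have : x = e0 := by simpa using (PySem.Set.mem_ofList [e0] x).mp hx
    exact this ▸ Relation.ReflTransGen.refl
  | succ n ih =>
    intro x hx
    rw [pvIter_succ] at hx
    rcases (mem_checkRound g _ x).mp hx with h | ⟨v, hv, hx'⟩
    · exact ih x h
    · exact Relation.ReflTransGen.tail (ih v hv) hx'

-- a round with no new members ("stuck") stays stuck forever
def pvStuck (g : PySem.Dict Int (List Int)) (v : PySem.Set Int) : Prop :=
  ∀ y, y ∈ checkRound g v → y ∈ v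

lemma round_congr (g : PySem.Dict Int (List Int)) {v v' : PySem.Set Int}
    (h : ∀ z, z ∈ v ↔ z ∈ v') (y : Int) : y ∈ checkRound g v ↔ y ∈ checkRound g v' := by
  simp only [mem_checkRound]
  constructor
  · rintro (hy | ⟨x, hx, hy⟩)
    · exact Or.inl ((h y).mp hy)
    · exact Or.inr ⟨x, (h x).mp hx, hy⟩
  · rintro (hy | ⟨x, hx, hy⟩)
    · exact Or.inl ((h y).mpr hy)
    · exact Or.inr ⟨x, (h x).mpr hx, hy⟩

lemma stuck_forever (g : PySem.Dict Int (List Int)) (v0 : PySem.Set Int) {n : Nat}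
    (hs : pvStuck g (pvIter g v0 n)) :
    ∀ k, n ≤ k → (∀ y, y ∈ pvIter g v0 k ↔ y ∈ pvIter g v0 n) ∧ pvStuck g (pvIter g v0 k) := by
  intro k hk
  induction k with
  | zero =>
    have : n = 0 := by omega
    subst this
    exact ⟨fun y => Iff.rfl, hs⟩
  | succ k ih =>
    rcases Nat.lt_or_ge n (k+1) with hlt | hge
    · obtain ⟨heq, hstk⟩ := ih (by omega)
      have heq' : ∀ y, y ∈ pvIter g v0 (k+1) ↔ y ∈ pvIter g v0 n := by
        intro y
        rw [pvIter_succ]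
        constructor
        · intro hy
          exact (heq y).mp (hstk y hy)
        · intro hy
          exact (mem_checkRound g _ y).mpr (Or.inl ((heq y).mpr hy))
      refine ⟨heq', fun y hy => ?_⟩
      have := (round_congr g heq' y).mp hy
      exact (heq' y).mpr (hs y this)
    · have : n = k + 1 := by omega
      subst this
      exact ⟨fun y => Iff.rfl, hs⟩

-- the visited KEYS: the only part of `visited` the neighbour pool depends on
def pvKF (g : PySem.Dict Int (List Int)) (v : PySem.Set Int) : Finset Int :=
  g.keys.toFinset.filter (· ∈ v)

lemma pvKey_of_getD_mem (g : PySem.Dict Int (List Int)) {x y : Int} (h : y ∈ g.getD x []) :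
    x ∈ g.keys := by
  by_cases hc : g.contains x
  · exact (PySem.Dict.contains_iff_mem_keys g x).mp hc
  · rw [PySem.Dict.getD_of_not_contains g ([] : List Int) (by simpa using hc)] at h
    simp at h

lemma stuck_next_of_KF_eq (g : PySem.Dict Int (List Int)) (v : PySem.Set Int)
    (h : pvKF g (checkRound g v) = pvKF g v) : pvStuck g (checkRound g v) := by
  intro y hy
  rcases (mem_checkRound g _ y).mp hy with h' | ⟨x, hx, hy'⟩
  · exact h'
  · have hxk : x ∈ g.keys := pvKey_of_getD_mem g hy'
    have hxKF : x ∈ pvKF g (checkRound g v) := by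
      simp only [pvKF, Finset.mem_filter, List.mem_toFinset]
      exact ⟨hxk, hx⟩
    rw [h] at hxKF
    have hxv : x ∈ v := by
      simp only [pvKF, Finset.mem_filter] at hxKF
      exact hxKF.2
    exact (mem_checkRound g v y).mpr (Or.inr ⟨x, hxv, hy'⟩)

lemma pvKF_mono_round (g : PySem.Dict Int (List Int)) (v : PySem.Set Int) :
    pvKF g v ⊆ pvKF g (checkRound g v) := by
  intro x hx
  simp only [pvKF, Finset.mem_filter] at hx ⊢
  exact ⟨hx.1, (mem_checkRound g v x).mpr (Or.inl hx.2)⟩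

lemma pvKF_growth (g : PySem.Dict Int (List Int)) (v0 : PySem.Set Int) :
    ∀ (m : Nat), (∀ i < m, pvKF g (pvIter g v0 (i+1)) ≠ pvKF g (pvIter g v0 i)) →
      m + (pvKF g v0).card ≤ (pvKF g (pvIter g v0 m)).card := by
  intro m
  induction m with
  | zero => intro _; simp [pvIter]
  | succ m ih =>
    intro h
    have h1 := ih (fun i hi => h i (by omega))
    have hne := h m (by omega)
    have hsub : pvKF g (pvIter g v0 m) ⊆ pvKF g (pvIter g v0 (m+1)) := by
      rw [pvIter_succ]; exact pvKF_mono_round g _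
    have hss : pvKF g (pvIter g v0 m) ⊂ pvKF g (pvIter g v0 (m+1)) :=
      Finset.ssubset_iff_subset_ne.mpr ⟨hsub, fun hEq => hne (hEq.symm)⟩
    have := Finset.card_lt_card hss
    omega

-- the saturated set is closed: it exists by a pigeonhole on the visited keys
lemma pvIter_stuck_at (g : PySem.Dict Int (List Int)) (e0 : Int) (m : Nat)
    (hkey : e0 ∈ g.keys) (hm : g.keys.toFinset.card ≤ m) :
    pvStuck g (pvIter g (PySem.Set.ofList [e0]) m) := by
  set v0 : PySem.Set Int := PySem.Set.ofList [e0] with hv0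
  have hcard0 : 1 ≤ (pvKF g v0).card := by
    have : e0 ∈ pvKF g v0 := by
      simp only [pvKF, Finset.mem_filter, List.mem_toFinset]
      refine ⟨hkey, ?_⟩
      simp [hv0, PySem.Set.mem_ofList]
    exact Finset.card_pos.mpr ⟨e0, this⟩
  have hbound : ∀ n, (pvKF g (pvIter g v0 n)).card ≤ g.keys.toFinset.card := by
    intro n
    exact Finset.card_filter_le _ _
  by_cases hall : ∀ i < m, pvKF g (pvIter g v0 (i+1)) ≠ pvKF g (pvIter g v0 i)
  · have := pvKF_growth g v0 m hall
    have := hbound m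
    omega
  · push Not at hall
    obtain ⟨i, hi, heq⟩ := hall
    have hstk : pvStuck g (pvIter g v0 (i+1)) := by
      rw [pvIter_succ] at heq ⊢
      exact stuck_next_of_KF_eq g _ heq
    exact (stuck_forever g v0 hstk m (by omega)).2

lemma pvIter_correct (g : PySem.Dict Int (List Int)) (e0 x : Int) (m : Nat)
    (hkey : e0 ∈ g.keys) (hm : g.keys.toFinset.card ≤ m) :
    x ∈ pvIter g (PySem.Set.ofList [e0]) m ↔ pvReach g e0 x := by
  constructor
  · exact pvIter_sound g e0 m x
  · intro h
    have hstk := pvIter_stuck_at g e0 m hkey hm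
    induction h with
    | refl =>
      exact pvIter_mono g _ (Nat.zero_le m) (by simp [pvIter, PySem.Set.mem_ofList])
    | tail _ hbc ihb =>
      exact hstk _ ((mem_checkRound g _ _).mpr (Or.inr ⟨_, ihb, hbc⟩))

-- ---- glue: the removals keep the keys, and both memberships coincide ----

lemma pvRemoveAdj_keys (g : PySem.Dict Int (List Int)) (a b : Int)
    (ha : a ∈ g.keys) : (pvRemoveAdj g a b).keys = g.keys := by
  unfold pvRemoveAdj
  have hc : g.contains a = true := (PySem.Dict.contains_iff_mem_keys g a).mpr ha
  rw [PySem.Dict.keys_modify, PySem.Dict.keys_insert_of_contains g _ hc]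

theorem check_spec : Claim_equal_check := by
  intro graph e _ hpre
  obtain ⟨h1, h2, _, _⟩ := hpre
  unfold Spec_check
  have hA : check graph e
      = decide (e.1 ∈ checkDfs (pvRemoveAdj (pvRemoveAdj (PySem.Dict.mk graph) e.1 e.2) e.2 e.1)
          (2 + (((pvRemoveAdj (pvRemoveAdj (PySem.Dict.mk graph) e.1 e.2) e.2 e.1).values.map List.length).sum))
          PySem.Set.empty e.2) := rfl
  have hB : check_alt graph e
      = decide (e.1 ∈ pvIter (pvRemoveAdj (pvRemoveAdj (PySem.Dict.mk graph) e.1 e.2) e.2 e.1)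
          (PySem.Set.ofList [e.2]) graph.length) := rfl
  rw [hA, hB]
  set g0 := PySem.Dict.mk graph with hg0
  have hkeys0 : g0.keys = graph.map Prod.fst := rfl
  have h1' : e.1 ∈ g0.keys := by rw [hkeys0]; exact h1
  have h2' : e.2 ∈ g0.keys := by rw [hkeys0]; exact h2
  set g1 := pvRemoveAdj g0 e.1 e.2 with hg1
  have hkeys1 : g1.keys = g0.keys := pvRemoveAdj_keys g0 e.1 e.2 h1'
  set g := pvRemoveAdj g1 e.2 e.1 with hg
  have hkeys : g.keys = g0.keys := by
    rw [pvRemoveAdj_keys g1 e.2 e.1 (by rw [hkeys1]; exact h2'), hkeys1]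
  have hkey : e.2 ∈ g.keys := by rw [hkeys]; exact h2'
  have hm : g.keys.toFinset.card ≤ graph.length := by
    calc g.keys.toFinset.card ≤ g.keys.length := List.toFinset_card_le _
      _ = graph.length := by rw [hkeys, hkeys0, List.length_map]
  have hiffA := checkDfs_correct g _ e.2 e.1 (pv_fuelA_ok g e.2)
  have hiffB := pvIter_correct g e.2 e.1 graph.length hkey hm
  simp only [decide_eq_decide]
  rw [hiffA, hiffB]
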